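/- GENERATED by farm/mkstatement.py from design/units.tsv (unit `start_decoder.9`) and the assertions of Vorbis/Spec/StartDecoderA.lean — do not edit.
   THE STATEMENT of the proof unit `start_decoder.9`: segment 9 of `start_decoder` (60 instructions; entries 0x114184;
   exits 0x113b22,0x11428b; ranges 0x114184-0x1141ab + 0x1141bf-0x114286 + 0x114415-0x114434)
   takes each of its entry assertions to one of its exit assertions (`Vorbis.Spec.StartDecoder.Seg9`), given the contracts of its callees.
   What the names mean: Vorbis/Spec/Basic.lean (the shared hypotheses), Vorbis/Spec/StartDecoderA.lean (the assertions). The theorem to prove: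
   `theorem start_decoder_9_ok : Vorbis.Spec.start_decoder_9.Statement`. -/
import Vorbis.Spec.Alloc
import Vorbis.Spec.Leaves
import Vorbis.Spec.Libc
import Vorbis.Spec.Reader
import Vorbis.Spec.StartDecoderA
namespace Vorbis.Spec.start_decoder_9
open X86 X86.User Asan

/-- The statement of unit `start_decoder.9`. -/
def Statement : Prop :=
  ∀ (Lay : Layout) (_hLay : Lay.hi = 0x1000000) (μ : Microarch) (_hμ : UserX.MicroOK μ) (u₀ : State)
    (_hcode : HasCodeNat Lay u₀ Vorbis.L.start_decoder.entry Vorbis.Code.code_start_decoder.nat Vorbis.L.start_decoder.size)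
    (_h_start_packet : ∀ (others : List Obj) (frames : List (Nat × FrameLayout)) (Blk : Block → Prop) (len : Nat), Calls Lay μ Vorbis.WayInv (Vorbis.conv u₀) Vorbis.L.start_packet.entry (Vorbis.Spec.start_packet.spec others frames Blk len))
    (_h_crc32_init : ∀ (others : List Obj) (frames : List (Nat × FrameLayout)), Calls Lay μ Vorbis.WayInv (Vorbis.conv u₀) Vorbis.L.crc32_init.entry (Vorbis.Spec.crc32_init.spec others frames))
    (_h_get8_packet : ∀ (others : List Obj) (frames : List (Nat × FrameLayout)) (Blk : Block → Prop) (len : Nat), Calls Lay μ Vorbis.WayInv (Vorbis.conv u₀) Vorbis.L.get8_packet.entry (Vorbis.Spec.get8_packet.spec others frames Blk len))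
    (_h_error : ∀ (others : List Obj) (frames : List (Nat × FrameLayout)), Calls Lay μ Vorbis.WayInv (Vorbis.conv u₀) Vorbis.L.error.entry (Vorbis.Spec.error.spec others frames))
    (_h_asan_store1_noabort : Asan.SmallCheck Lay μ Vorbis.WayInv (Vorbis.CodeOK u₀) [.rax, .rdx] 1 Vorbis.L.__asan_store1_noabort.entry)
    (_h_vorbis_validate : ∀ (others : List Obj) (frames : List (Nat × FrameLayout)), Calls Lay μ Vorbis.WayInv (Vorbis.conv u₀) Vorbis.L.vorbis_validate.entry (Vorbis.Spec.vorbis_validate.spec others frames))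
    (_h_get_bits : ∀ (others : List Obj) (frames : List (Nat × FrameLayout)) (Blk : Block → Prop) (len : Nat), Calls Lay μ Vorbis.WayInv (Vorbis.conv u₀) Vorbis.L.get_bits.entry (Vorbis.Spec.get_bits.spec others frames Blk len))
    (_h_asan_store4_noabort : Asan.SmallCheck Lay μ Vorbis.WayInv (Vorbis.CodeOK u₀) [.rax, .rcx, .rdx] 4 Vorbis.L.__asan_store4_noabort.entry)
    (_h_setup_malloc : ∀ (others : List Obj) (frames : List (Nat × FrameLayout)) (A : Arena), Calls Lay μ Vorbis.WayInv (Vorbis.conv u₀) Vorbis.L.setup_malloc.entry (Vorbis.Spec.setup_malloc.spec others frames A))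
    (_h_asan_store8_noabort : Asan.SmallCheck Lay μ Vorbis.WayInv (Vorbis.CodeOK u₀) [.rax, .rcx, .rdx] 8 Vorbis.L.__asan_store8_noabort.entry)
    (_h_asan_load4_noabort : Asan.SmallCheck Lay μ Vorbis.WayInv (Vorbis.CodeOK u₀) [.rax, .rcx, .rdx] 4 Vorbis.L.__asan_load4_noabort.entry)
    (_h_memset : ∀ (others : List Obj) (frames : List (Nat × FrameLayout)), Calls Lay μ Vorbis.WayInv (Vorbis.conv u₀) Vorbis.L.memset.entry (Vorbis.Spec.memset.spec others frames)),
    Vorbis.Spec.StartDecoder.Seg9 Lay μ u₀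

end Vorbis.Spec.start_decoder_9
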